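-- pv_equiv track=rewrite | github.com/AlexC1991/VoxAI_IDE | scripts/basic_project_start_benchmark.py | sanitize_model_slug
-- ===== SOURCE A (Python) =====
-- def sanitize_model_slug(model: str) -> str:
--     cleaned = []
--     previous_underscore = False
--     for ch in str(model or "").lower():
--         if ch.isalnum():
--             cleaned.append(ch)
--             previous_underscore = False
--             continue
--         if not previous_underscore:
--             cleaned.append("_")
--             previous_underscore = True
--     return "".join(cleaned).strip("_") or "benchmark_model"
-- ===== SOURCE B (Python) =====
-- def sanitize_model_slug(model: str) -> str:
--     s = str(model or "").lower()
--     words = []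
--     i = 0
--     while i < len(s):
--         if s[i].isalnum():
--             j = i + 1
--             while j < len(s) and s[j].isalnum():
--                 j += 1
--             words.append(s[i:j])
--             i = j
--         else:
--             i += 1
--     return "_".join(words) or "benchmark_model"
-- ===== Notes on version B (the rewrite author's own statement) =====
-- stated objective: alternative
-- what changed: Replaced the per-character previous_underscore state machine plus final strip('_') with a run-extraction scan that collects the maximal alphanumeric runs as words and joins them with single underscores, so no separator collapsing or edge stripping is ever needed.
import Mathlib
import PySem

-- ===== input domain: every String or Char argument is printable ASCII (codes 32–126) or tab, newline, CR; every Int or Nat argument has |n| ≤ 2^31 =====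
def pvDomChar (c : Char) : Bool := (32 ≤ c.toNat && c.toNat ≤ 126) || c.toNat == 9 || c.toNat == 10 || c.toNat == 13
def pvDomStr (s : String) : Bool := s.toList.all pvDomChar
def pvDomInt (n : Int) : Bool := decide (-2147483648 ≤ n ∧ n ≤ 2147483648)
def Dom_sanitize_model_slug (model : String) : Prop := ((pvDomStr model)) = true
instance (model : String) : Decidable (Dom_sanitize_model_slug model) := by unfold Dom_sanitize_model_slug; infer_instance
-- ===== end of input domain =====

-- B replaces A's per-character previous_underscore state machine + final strip('_') by a run-extraction scan: collect the maximal alphanumeric runs as words and join them with '_'; return values proved equal on all inputs.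


-- ===== PORT A =====
-- the for-loop with (cleaned, previous_underscore) state, as a foldl over the lowered characters;
-- "".join(cleaned).strip("_") is PySem.Chars.stripChars on the char list, `or "benchmark_model"` is the isEmpty test
def sanitize_model_slug (model : String) : String :=
  let s : String := if model == "" then "" else model  -- str(model or "")
  let st : List Char × Bool :=
    (PySem.Chars.lower s.toList).foldl
      (fun (st : List Char × Bool) ch =>
        if PySem.Chars.isalnum ch then (st.1 ++ [ch], false)
        else if st.2 then st
        else (st.1 ++ ['_'], true))
      ([], false)
  let r : List Char := PySem.Chars.stripChars st.1 ['_']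
  if r.isEmpty then "benchmark_model" else String.ofList r

-- ===== PORT B =====
-- B's outer while-loop: at an alphanumeric position scan the whole run (inner while = takeWhile)
-- and continue after it (dropWhile); at a non-alphanumeric position step one character
def altWords : List Char → List (List Char)
  | [] => []
  | c :: cs =>
    if PySem.Chars.isalnum c then
      (c :: cs.takeWhile PySem.Chars.isalnum) :: altWords (cs.dropWhile PySem.Chars.isalnum)
    else altWords cs
termination_by s => s.length
decreasing_by
  · have := List.length_dropWhile_le PySem.Chars.isalnum cs; simp; omega
  · simp

def sanitize_model_slug_alt (model : String) : String :=
  let s : String := if model == "" then "" else model  -- str(model or "")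
  let slug : List Char := PySem.Chars.join ['_'] (altWords (PySem.Chars.lower s.toList))
  if slug.isEmpty then "benchmark_model" else String.ofList slug

-- ===== PRECONDITION & SPEC =====
def Spec_sanitize_model_slug (model : String) (out : String) : Prop := out = sanitize_model_slug_alt model
instance (model : String) (out : String) : Decidable (Spec_sanitize_model_slug model out) := by unfold Spec_sanitize_model_slug; infer_instance

-- ===== CLAIM (what is proved, stated in full; the proofs are below) =====
def Claim_equal_sanitize_model_slug : Prop := ∀ (model : String), Dom_sanitize_model_slug model → Spec_sanitize_model_slug model (sanitize_model_slug model)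

-- ===== LEMMAS AND PROOFS =====

-- A's loop, as a recursion (the foldl is reduced to this below)
def aRun : List Char → Bool → List Char
  | [], _ => []
  | c :: cs, prev =>
    if PySem.Chars.isalnum c then c :: aRun cs false
    else if prev then aRun cs true
    else '_' :: aRun cs true

theorem alnum_ne_underscore (c : Char) (h : PySem.Chars.isalnum c = true) : (('_' : Char) == c) = false := by
  rcases eq_or_ne '_' c with rfl | hne
  · exact absurd h (by decide)
  · simpa using hne

-- A's foldl equals aRun
theorem foldA_eq (s : List Char) : ∀ (acc : List Char) (prev : Bool),
    (s.foldl (fun (st : List Char × Bool) ch =>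
        if PySem.Chars.isalnum ch then (st.1 ++ [ch], false)
        else if st.2 then st
        else (st.1 ++ ['_'], true)) (acc, prev)).1 = acc ++ aRun s prev := by
  induction s with
  | nil => intro acc prev; simp [aRun]
  | cons c cs ih =>
    intro acc prev
    by_cases h : PySem.Chars.isalnum c = true
    · simp [aRun, h, List.foldl_cons, ih]
    · cases prev <;> simp [aRun, h, List.foldl_cons, ih]

-- skipping a non-alnum prefix changes neither side
theorem aRun_skip (cs : List Char) : aRun cs true = aRun (cs.dropWhile (fun x => !PySem.Chars.isalnum x)) false := by
  induction cs with
  | nil => simp [aRun]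
  | cons c cs ih =>
    by_cases h : PySem.Chars.isalnum c = true
    · simp [aRun, h]
    · simp [aRun, h, ih]

theorem altWords_skip (cs : List Char) : altWords (cs.dropWhile (fun x => !PySem.Chars.isalnum x)) = altWords cs := by
  induction cs with
  | nil => simp
  | cons c cs ih =>
    by_cases h : PySem.Chars.isalnum c = true
    · simp [h]
    · simp [h, ih, altWords]

-- A's loop over an alnum-headed list copies the whole run
theorem aRun_alnum (cs : List Char) : ∀ (c : Char) (prev : Bool), PySem.Chars.isalnum c = true →
    aRun (c :: cs) prev = (c :: cs.takeWhile PySem.Chars.isalnum) ++ aRun (cs.dropWhile PySem.Chars.isalnum) false := by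
  induction cs with
  | nil => intro c prev h; simp [aRun, h]
  | cons d ds ih =>
    intro c prev h
    by_cases hd : PySem.Chars.isalnum d = true
    · rw [show aRun (c :: d :: ds) prev = c :: aRun (d :: ds) false from by simp [aRun, h]]
      rw [ih d false hd]
      simp [hd]
    · simp [aRun, h, hd]

-- join helpers
theorem join_singleton (a : List Char) : PySem.Chars.join ['_'] [a] = a := by
  simp [PySem.Chars.join, List.intercalate]

theorem join_cons_ne (a : List Char) (L : List (List Char)) (h : L ≠ []) :
    PySem.Chars.join ['_'] (a :: L) = a ++ '_' :: PySem.Chars.join ['_'] L := by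
  match L with
  | [] => exact absurd rfl h
  | b :: L' => simp [PySem.Chars.join, List.intercalate, List.intersperse]

-- the strip predicate used by .strip("_") and its one-sided (right) strip
def pU (c : Char) : Bool := List.contains ['_'] c

def rstripU (s : List Char) : List Char := (s.reverse.dropWhile pU).reverse

theorem stripChars_eq (s : List Char) : PySem.Chars.stripChars s ['_'] = rstripU (s.dropWhile pU) := rfl

theorem strip_cons_us (Z : List Char) :
    PySem.Chars.stripChars ('_' :: Z) ['_'] = PySem.Chars.stripChars Z ['_'] := by
  rw [stripChars_eq, stripChars_eq, List.dropWhile_cons]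
  norm_num [pU]

theorem pU_alnum (c : Char) (h : PySem.Chars.isalnum c = true) : pU c = false := by
  have h1 := alnum_ne_underscore c h
  simp [pU]
  intro he; rw [he] at h1; simp at h1

theorem dropWhile_head_false {p : Char → Bool} : ∀ (l l' : List Char) (a : Char), l.dropWhile p = a :: l' → p a = false := by
  intro l
  induction l with
  | nil => intro l' a h; simp at h
  | cons c cs ih =>
    intro l' a h
    by_cases hc : p c = true
    · rw [List.dropWhile_cons_of_pos hc] at h; exact ih l' a h
    · rw [List.dropWhile_cons_of_neg hc] at h
      cases h; simpa using hc

theorem dropWhile_all_false {p : Char → Bool} (l : List Char) (h : ∀ x ∈ l, p x = false) :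
    l.dropWhile p = l := by
  match l with
  | [] => rfl
  | c :: cs => rw [List.dropWhile_cons_of_neg (by simp [h c (by simp)])]

-- strip of an alnum-headed run ++ X : the run survives whole, X is right-stripped
theorem strip_run_append (run X : List Char) (hne : run ≠ [])
    (hal : ∀ x ∈ run, PySem.Chars.isalnum x = true) :
    PySem.Chars.stripChars (run ++ X) ['_'] = run ++ rstripU X := by
  match run with
  | [] => exact absurd rfl hne
  | c :: tw =>
    have hc : pU c = false := pU_alnum c (hal c (by simp))
    have hdropRun : List.dropWhile pU (c :: tw).reverse = (c :: tw).reverse :=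
      dropWhile_all_false _ (fun x hx => pU_alnum x (hal x (List.mem_reverse.mp hx)))
    rw [stripChars_eq]
    rw [show List.dropWhile pU ((c :: tw) ++ X) = (c :: tw) ++ X from by
      simp [hc]]
    unfold rstripU
    rw [List.reverse_append, List.dropWhile_append]
    by_cases hE : (List.dropWhile pU X.reverse).isEmpty = true
    · simp only [hE, if_true, hdropRun]
      simp only [List.isEmpty_iff] at hE
      simp [hE]
    · simp only [hE]
      simp

theorem rstripU_cons_underscore (Y : List Char) (e : Char) (he : e ∈ Y) (hpe : pU e = false) :
    rstripU ('_' :: Y) = '_' :: rstripU Y := by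
  have hne : (List.dropWhile pU Y.reverse).isEmpty = false := by
    rw [List.isEmpty_eq_false_iff, Ne, List.dropWhile_eq_nil_iff]
    intro h
    exact absurd (h e (by simpa using he)) (by simp [hpe])
  unfold rstripU
  rw [show ('_' :: Y).reverse = Y.reverse ++ ['_'] from by simp]
  rw [List.dropWhile_append, hne]
  simp

-- main lemma: strip of the state machine's output = '_'-join of B's words
theorem stripA (s : List Char) :
    PySem.Chars.stripChars (aRun s false) ['_'] = PySem.Chars.join ['_'] (altWords s) := by
  have main : ∀ n (s : List Char), s.length ≤ n →
      PySem.Chars.stripChars (aRun s false) ['_'] = PySem.Chars.join ['_'] (altWords s) := by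
    intro n
    induction n with
    | zero =>
      intro s hs; simp at hs; subst hs
      simp [aRun, altWords, PySem.Chars.stripChars, PySem.Chars.join, List.intercalate]
    | succ n ih =>
      intro s hs
      match s with
      | [] => simp [aRun, altWords, PySem.Chars.stripChars, PySem.Chars.join, List.intercalate]
      | c :: cs =>
        simp only [List.length_cons] at hs
        by_cases h : PySem.Chars.isalnum c = true
        · -- alnum head: a whole run is copied
          have hA := aRun_alnum cs c false h
          have hal : ∀ x ∈ c :: cs.takeWhile PySem.Chars.isalnum, PySem.Chars.isalnum x = true := by
            intro x hx
            rcases List.mem_cons.mp hx with rfl | hx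
            · exact h
            · exact List.mem_takeWhile_imp hx
          rw [hA, strip_run_append _ _ (by simp) hal]
          rw [show altWords (c :: cs) = (c :: cs.takeWhile PySem.Chars.isalnum)
                :: altWords (cs.dropWhile PySem.Chars.isalnum) from by rw [altWords]; simp [h]]
          have hlenrest := List.length_dropWhile_le PySem.Chars.isalnum cs
          rcases hrest : cs.dropWhile PySem.Chars.isalnum with _ | ⟨d, ds⟩
          · -- no characters after the run
            have h0 : altWords ([] : List Char) = [] := by simp [altWords]
            rw [h0, join_singleton]
            simp [aRun, rstripU]
          · have hd : PySem.Chars.isalnum d = false := dropWhile_head_false cs ds d hrest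
            have hX : aRun (d :: ds) false
                = '_' :: aRun (ds.dropWhile (fun x => !PySem.Chars.isalnum x)) false := by
              rw [show aRun (d :: ds) false = '_' :: aRun ds true from by simp [aRun, hd], aRun_skip]
            rw [hX]
            have hlen2 := List.length_dropWhile_le (fun x => !PySem.Chars.isalnum x) ds
            rcases hrest2 : ds.dropWhile (fun x => !PySem.Chars.isalnum x) with _ | ⟨e, es⟩
            · -- trailing junk only: the '_' is right-stripped away
              have h0 : altWords (d :: ds) = [] := by
                rw [show altWords (d :: ds) = altWords ds from by rw [altWords]; simp [hd]]
                rw [← altWords_skip ds, hrest2]; simp [altWords]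
              rw [h0, join_singleton]
              simp [aRun, rstripU, pU]
            · have he : PySem.Chars.isalnum e = true := by
                have := dropWhile_head_false ds es e hrest2
                simpa using this
              have hY : aRun (e :: es) false = e :: aRun es false := by simp [aRun, he]
              have hmem : e ∈ aRun (e :: es) false := by rw [hY]; simp
              rw [rstripU_cons_underscore _ e hmem (pU_alnum e he)]
              have hstripY : PySem.Chars.stripChars (aRun (e :: es) false) ['_']
                  = rstripU (aRun (e :: es) false) := by
                rw [stripChars_eq, hY, List.dropWhile_cons, pU_alnum e he]
                simp
              have hih := ih (e :: es) (by
                have h1 : (e :: es).length ≤ ds.length := by rw [← hrest2]; exact hlen2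
                have h2 : (d :: ds).length ≤ cs.length := by rw [← hrest]; exact hlenrest
                simp only [List.length_cons] at h1 h2 ⊢
                omega)
              rw [← hstripY, hih]
              have hruns2 : altWords (d :: ds) = altWords (e :: es) := by
                rw [show altWords (d :: ds) = altWords ds from by rw [altWords]; simp [hd]]
                rw [← altWords_skip ds, hrest2]
              rw [hruns2, join_cons_ne _ _ (by rw [altWords]; simp [he])]
        · -- non-alnum head: the leading '_' is left-stripped away
          have hstep : aRun (c :: cs) false
              = '_' :: aRun (cs.dropWhile (fun x => !PySem.Chars.isalnum x)) false := by
            rw [show aRun (c :: cs) false = '_' :: aRun cs true from by simp [aRun, h], aRun_skip]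
          rw [hstep, strip_cons_us]
          have hih := ih (cs.dropWhile (fun x => !PySem.Chars.isalnum x)) (by
            have := List.length_dropWhile_le (fun x => !PySem.Chars.isalnum x) cs; omega)
          rw [hih, altWords_skip]
          rw [show altWords (c :: cs) = altWords cs from by rw [altWords]; simp [h]]
  exact main s.length s le_rfl

-- ===== VERDICT (by name: the statement is the Claim_ definition above) =====
theorem sanitize_model_slug_spec : Claim_equal_sanitize_model_slug := by
  intro model _
  unfold Spec_sanitize_model_slug sanitize_model_slug sanitize_model_slug_alt
  simp only [foldA_eq, List.nil_append, stripA]
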